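-- pv_equiv track=rewrite | github.com/SubhadipJana1409/Microbiome-Network-Analysis | network_analysis.py | get_phylum
-- ===== SOURCE A (Python) =====
-- FIRM_KW = ["ruminococcus","clostridium","faecalibacterium","butyrivibrio",
--            "eubacterium","lachnospira","roseburia","blautia","coprococcus",
--            "dorea","lactobacillus","enterococcus","streptococcus","anaerostipes",
--            "subdoligranulum","anaerotruncus","bryantella","bulleidia","dialister",
--            "phascolarctobacterium","veillonella","bacillus","papillibacter"]
--
-- BACT_KW = ["bacteroides","prevotella","alistipes","parabacteroides","allistipes",
--            "bilophila","barnesiella","butyricimonas"]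
--
-- ACTI_KW = ["bifidobacterium","atopobium","collinsella","actinomyces","wissella"]
--
-- PROT_KW = ["escherichia","klebsiella","haemophilus","helicobacter","aeromonas",
--            "aquabacterium","burkholderia","stenotrophomonas"]
--
-- VERR_KW = ["akkermansia"]
--
-- def get_phylum(taxon):
--     t = taxon.lower()
--     if any(k in t for k in FIRM_KW): return "Firmicutes"
--     if any(k in t for k in BACT_KW): return "Bacteroidetes"
--     if any(k in t for k in ACTI_KW): return "Actinobacteria"
--     if any(k in t for k in PROT_KW): return "Proteobacteria"
--     if any(k in t for k in VERR_KW): return "Verrucomicrobia"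
--     return "Other"
-- ===== SOURCE B (Python) =====
-- # Different algorithm: instead of five staged keyword scans over the text with early return,
-- # scan the TEXT once position by position; at each position test which group's keyword starts
-- # there and keep the minimum group priority seen; map the final priority to its name at the end.
-- NAMES = ["Firmicutes", "Bacteroidetes", "Actinobacteria", "Proteobacteria",
--          "Verrucomicrobia", "Other"]
--
-- GROUPS = [
--     ["ruminococcus","clostridium","faecalibacterium","butyrivibrio",
--      "eubacterium","lachnospira","roseburia","blautia","coprococcus",
--      "dorea","lactobacillus","enterococcus","streptococcus","anaerostipes",
--      "subdoligranulum","anaerotruncus","bryantella","bulleidia","dialister",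
--      "phascolarctobacterium","veillonella","bacillus","papillibacter"],
--     ["bacteroides","prevotella","alistipes","parabacteroides","allistipes",
--      "bilophila","barnesiella","butyricimonas"],
--     ["bifidobacterium","atopobium","collinsella","actinomyces","wissella"],
--     ["escherichia","klebsiella","haemophilus","helicobacter","aeromonas",
--      "aquabacterium","burkholderia","stenotrophomonas"],
--     ["akkermansia"],
-- ]
--
-- def get_phylum(taxon):
--     t = taxon.lower()
--     best = 5
--     for i in range(len(t)):
--         for pr, kws in enumerate(GROUPS):
--             if pr < best and any(t.startswith(k, i) for k in kws):
--                 best = pr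
--     return NAMES[best]
-- ===== Notes on version B (the rewrite author's own statement) =====
-- stated objective: alternative
-- what changed: A scans the five keyword groups in priority order over the whole text with early return; B scans the text once position by position, tests which keywords start at each position, and keeps the minimum group priority in an accumulator, mapping it to a name at the end.
import Mathlib
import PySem

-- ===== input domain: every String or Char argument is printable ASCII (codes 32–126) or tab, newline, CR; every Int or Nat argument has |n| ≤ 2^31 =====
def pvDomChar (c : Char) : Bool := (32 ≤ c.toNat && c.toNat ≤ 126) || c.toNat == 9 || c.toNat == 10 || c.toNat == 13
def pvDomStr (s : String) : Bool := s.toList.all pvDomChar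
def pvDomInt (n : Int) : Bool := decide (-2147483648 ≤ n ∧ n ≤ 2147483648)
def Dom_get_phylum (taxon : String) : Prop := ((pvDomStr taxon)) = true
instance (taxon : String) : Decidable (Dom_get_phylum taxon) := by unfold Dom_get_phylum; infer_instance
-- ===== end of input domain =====

-- B replaces A's five priority-ordered keyword scans (early return) by a single positional scan
-- of the text keeping the minimum matched group priority in an accumulator; objective: alternative.

-- ===== PORT A =====
def FIRM_KW : List String := ["ruminococcus","clostridium","faecalibacterium","butyrivibrio",
  "eubacterium","lachnospira","roseburia","blautia","coprococcus",
  "dorea","lactobacillus","enterococcus","streptococcus","anaerostipes",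
  "subdoligranulum","anaerotruncus","bryantella","bulleidia","dialister",
  "phascolarctobacterium","veillonella","bacillus","papillibacter"]
def BACT_KW : List String := ["bacteroides","prevotella","alistipes","parabacteroides","allistipes",
  "bilophila","barnesiella","butyricimonas"]
def ACTI_KW : List String := ["bifidobacterium","atopobium","collinsella","actinomyces","wissella"]
def PROT_KW : List String := ["escherichia","klebsiella","haemophilus","helicobacter","aeromonas",
  "aquabacterium","burkholderia","stenotrophomonas"]
def VERR_KW : List String := ["akkermansia"]

def get_phylum (taxon : String) : String :=
  let t := PySem.Str.lower taxon
  if FIRM_KW.any (fun k => PySem.Str.isIn k t) then "Firmicutes"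
  else if BACT_KW.any (fun k => PySem.Str.isIn k t) then "Bacteroidetes"
  else if ACTI_KW.any (fun k => PySem.Str.isIn k t) then "Actinobacteria"
  else if PROT_KW.any (fun k => PySem.Str.isIn k t) then "Proteobacteria"
  else if VERR_KW.any (fun k => PySem.Str.isIn k t) then "Verrucomicrobia"
  else "Other"

-- ===== PORT B =====
def NAMES : List String := ["Firmicutes", "Bacteroidetes", "Actinobacteria", "Proteobacteria",
  "Verrucomicrobia", "Other"]

def GROUPS : List (List String) := [FIRM_KW, BACT_KW, ACTI_KW, PROT_KW, VERR_KW]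

-- t.startswith(k, i) with 0 ≤ i ≤ len(t) is exactly: k is a prefix of t[i:]
def get_phylum_alt (taxon : String) : String :=
  let t := (PySem.Str.lower taxon).toList
  let best : Int := (List.range t.length).foldl (fun best i =>
    (PySem.List.enumerate GROUPS).foldl (fun best p =>
      if p.1 < best ∧ p.2.any (fun k => PySem.Chars.startswith (t.drop i) k.toList) then p.1
      else best) best) 5
  ((PySem.List.pyGet? NAMES best).getD "")  -- best is provably in [0,5], so the lookup never misses

-- ===== PRECONDITION & SPEC =====
def Spec_get_phylum (taxon : String) (out : String) : Prop := out = get_phylum_alt taxon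
instance (taxon : String) (out : String) : Decidable (Spec_get_phylum taxon out) := by unfold Spec_get_phylum; infer_instance

-- ===== CLAIM (what is proved, stated in full; the proofs are below) =====
def Claim_equal_get_phylum : Prop := ∀ (taxon : String), Dom_get_phylum taxon → Spec_get_phylum taxon (get_phylum taxon)

-- ===== LEMMAS AND PROOFS =====

-- c t i pr : some keyword of group pr starts at position i of t
def pvC (t : List Char) (i : Nat) (pr : Int) : Bool :=
  (GROUPS.getD pr.toNat []).any (fun k => PySem.Chars.startswith (t.drop i) k.toList)

def pvInner (t : List Char) (i : Nat) (best : Int) : Int :=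
  (PySem.List.enumerate GROUPS).foldl (fun best p =>
    if p.1 < best ∧ p.2.any (fun k => PySem.Chars.startswith (t.drop i) k.toList) then p.1
    else best) best

-- the inner fold is a "min over matched priorities" fold; prove its properties generically
theorem minFold_spec (c : Int → Bool) (prs : List Int) (b : Int) :
    (prs.foldl (fun b pr => if pr < b ∧ c pr = true then pr else b) b) ≤ b ∧
    ((prs.foldl (fun b pr => if pr < b ∧ c pr = true then pr else b) b) = b ∨
      (c (prs.foldl (fun b pr => if pr < b ∧ c pr = true then pr else b) b) = true ∧
       (prs.foldl (fun b pr => if pr < b ∧ c pr = true then pr else b) b) ∈ prs)) ∧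
    (∀ pr ∈ prs, c pr = true → (prs.foldl (fun b pr => if pr < b ∧ c pr = true then pr else b) b) ≤ pr) := by
  induction prs generalizing b with
  | nil => simp
  | cons p ps ih =>
    simp only [List.foldl_cons, List.mem_cons]
    set b' := if p < b ∧ c p = true then p else b with hb'
    obtain ⟨ih1, ih2, ih3⟩ := ih b'
    have hb'le : b' ≤ b := by rw [hb']; split_ifs <;> omega
    have hb'p : c p = true → b' ≤ p := by
      intro hc; rw [hb']; split_ifs with h <;> simp_all
    refine ⟨by omega, ?_, ?_⟩
    · rcases ih2 with h | ⟨hc, hm⟩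
      · rw [h, hb']
        split_ifs with hcond
        · exact Or.inr ⟨hcond.2, Or.inl rfl⟩
        · exact Or.inl rfl
      · exact Or.inr ⟨hc, Or.inr hm⟩
    · rintro pr (rfl | hm) hc
      · exact le_trans ih1 (hb'p hc)
      · exact ih3 pr hm hc

theorem pvInner_eq (t : List Char) (i : Nat) (b : Int) :
    pvInner t i b =
      ([0, 1, 2, 3, 4] : List Int).foldl
        (fun b pr => if pr < b ∧ pvC t i pr = true then pr else b) b := by
  simp [pvInner, pvC, GROUPS, PySem.List.enumerate_cons, PySem.List.enumerate_nil]

theorem pvInner_spec (t : List Char) (i : Nat) (b : Int) (hb : 0 ≤ b) :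
    0 ≤ pvInner t i b ∧ pvInner t i b ≤ b ∧
    (pvInner t i b = b ∨ pvC t i (pvInner t i b) = true) ∧
    (∀ pr : Int, 0 ≤ pr → pr < 5 → pvC t i pr = true → pvInner t i b ≤ pr) := by
  rw [pvInner_eq]
  obtain ⟨h1, h2, h3⟩ := minFold_spec (pvC t i) [0, 1, 2, 3, 4] b
  refine ⟨?_, h1, ?_, ?_⟩
  · rcases h2 with h | ⟨_, hm⟩
    · rw [h]; exact hb
    · simp only [List.mem_cons, List.not_mem_nil, or_false] at hm
      rcases hm with h | h | h | h | h <;> omega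
  · rcases h2 with h | ⟨hc, _⟩
    · exact Or.inl h
    · exact Or.inr hc
  · intro pr hp0 hp5 hc
    exact h3 pr (by simp only [List.mem_cons]; omega) hc

theorem pvOuter_spec (t : List Char) (n : Nat) :
    0 ≤ ((List.range n).foldl (fun best i => pvInner t i best) (5 : Int)) ∧
    ((List.range n).foldl (fun best i => pvInner t i best) (5 : Int)) ≤ 5 ∧
    (((List.range n).foldl (fun best i => pvInner t i best) (5 : Int)) = 5 ∨
      ∃ i < n, pvC t i ((List.range n).foldl (fun best i => pvInner t i best) (5 : Int)) = true) ∧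
    (∀ (pr : Int) (i : Nat), 0 ≤ pr → pr < 5 → i < n → pvC t i pr = true →
      ((List.range n).foldl (fun best i => pvInner t i best) (5 : Int)) ≤ pr) := by
  induction n with
  | zero => simp
  | succ m ih =>
    obtain ⟨ih0, ih5, ihm, ihmin⟩ := ih
    simp only [List.range_succ, List.foldl_append, List.foldl_cons, List.foldl_nil]
    set r := (List.range m).foldl (fun best i => pvInner t i best) (5 : Int) with hr
    obtain ⟨j0, j1, j2, j3⟩ := pvInner_spec t m r ih0
    refine ⟨j0, by omega, ?_, ?_⟩
    · rcases j2 with h | h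
      · rw [h]
        rcases ihm with h5 | ⟨i, hi, hc⟩
        · exact Or.inl h5
        · exact Or.inr ⟨i, Nat.lt_succ_of_lt hi, hc⟩
      · exact Or.inr ⟨m, Nat.lt_succ_self m, h⟩
    · intro pr i hp0 hp5 hi hc
      rcases Nat.lt_succ_iff_lt_or_eq.mp hi with hi' | rfl
      · exact le_trans j1 (ihmin pr i hp0 hp5 hi' hc)
      · exact j3 pr hp0 hp5 hc

-- position-scan ↔ substring search, for groups of nonempty keywords
theorem pvExists_pos_iff (t : List Char) (ks : List String) (hne : ∀ k ∈ ks, k ≠ "") :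
    (∃ i < t.length, ks.any (fun k => PySem.Chars.startswith (t.drop i) k.toList) = true) ↔
      ks.any (fun k => PySem.Chars.isIn k.toList t) = true := by
  simp only [List.any_eq_true, PySem.Chars.startswith_iff, ← PySem.Chars.exists_prefix_drop_iff_isIn]
  constructor
  · rintro ⟨i, _, k, hk, hpre⟩
    exact ⟨k, hk, i, hpre⟩
  · rintro ⟨k, hk, j, hpre⟩
    have hk' : k.toList ≠ [] := by
      intro h
      exact hne k hk (by simpa using String.toList_inj.mp (by simpa using h))
    have hj : j < t.length := by
      by_contra hj
      rw [List.drop_eq_nil_of_le (by omega)] at hpre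
      exact hk' (List.prefix_nil.mp hpre)
    exact ⟨j, hj, k, hk, hpre⟩

-- ===== VERDICT (by name: the statement is the Claim_ definition above) =====
theorem get_phylum_spec : Claim_equal_get_phylum := by
  intro taxon _
  unfold Spec_get_phylum
  have hB : get_phylum_alt taxon =
      (PySem.List.pyGet? NAMES
        ((List.range (PySem.Str.lower taxon).toList.length).foldl
          (fun best i => pvInner (PySem.Str.lower taxon).toList i best) (5 : Int))).getD "" := rfl
  set tl := (PySem.Str.lower taxon).toList with htl
  set r := (List.range tl.length).foldl (fun best i => pvInner tl i best) (5 : Int) with hrdef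
  obtain ⟨hr0, hr5, hrch, hrmin⟩ := pvOuter_spec tl tl.length
  have m0 : FIRM_KW.any (fun k => PySem.Str.isIn k (PySem.Str.lower taxon)) = true ↔
      (∃ i < tl.length, pvC tl i 0 = true) := by
    simpa [pvC, GROUPS, htl] using (pvExists_pos_iff tl FIRM_KW (by decide)).symm
  have m1 : BACT_KW.any (fun k => PySem.Str.isIn k (PySem.Str.lower taxon)) = true ↔
      (∃ i < tl.length, pvC tl i 1 = true) := by
    simpa [pvC, GROUPS, htl] using (pvExists_pos_iff tl BACT_KW (by decide)).symm
  have m2 : ACTI_KW.any (fun k => PySem.Str.isIn k (PySem.Str.lower taxon)) = true ↔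
      (∃ i < tl.length, pvC tl i 2 = true) := by
    simpa [pvC, GROUPS, htl] using (pvExists_pos_iff tl ACTI_KW (by decide)).symm
  have m3 : PROT_KW.any (fun k => PySem.Str.isIn k (PySem.Str.lower taxon)) = true ↔
      (∃ i < tl.length, pvC tl i 3 = true) := by
    simpa [pvC, GROUPS, htl] using (pvExists_pos_iff tl PROT_KW (by decide)).symm
  have m4 : VERR_KW.any (fun k => PySem.Str.isIn k (PySem.Str.lower taxon)) = true ↔
      (∃ i < tl.length, pvC tl i 4 = true) := by
    simpa [pvC, GROUPS, htl] using (pvExists_pos_iff tl VERR_KW (by decide)).symm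
  have key : ∀ pr : Int, 0 ≤ pr → pr < 5 →
      (pr = 0 ∨ pr = 1 ∨ pr = 2 ∨ pr = 3 ∨ pr = 4) := by omega
  rw [← hrdef] at hr0 hr5 hrch hrmin
  rw [hB]
  simp only [get_phylum]
  split_ifs with h0 h1 h2 h3 h4
  · obtain ⟨i, hi, hc⟩ := m0.mp h0
    have : r = 0 := le_antisymm (hrmin 0 i (by omega) (by omega) hi hc) hr0
    rw [this]; decide
  · obtain ⟨i, hi, hc⟩ := m1.mp h1
    have hle : r ≤ 1 := hrmin 1 i (by omega) (by omega) hi hc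
    have hne0 : r ≠ 0 := by
      intro h
      rcases hrch with h5 | ⟨j, hj, hcj⟩
      · omega
      · rw [h] at hcj
        exact h0 (m0.mpr ⟨j, hj, hcj⟩)
    have : r = 1 := by omega
    rw [this]; decide
  · obtain ⟨i, hi, hc⟩ := m2.mp h2
    have hle : r ≤ 2 := hrmin 2 i (by omega) (by omega) hi hc
    have : r = 2 := by
      rcases hrch with h5 | ⟨j, hj, hcj⟩
      · omega
      · rcases key r hr0 (by omega) with h | h | h | h | h
        · rw [h] at hcj; exact absurd (m0.mpr ⟨j, hj, hcj⟩) h0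
        · rw [h] at hcj; exact absurd (m1.mpr ⟨j, hj, hcj⟩) h1
        · omega
        · omega
        · omega
    rw [this]; decide
  · obtain ⟨i, hi, hc⟩ := m3.mp h3
    have hle : r ≤ 3 := hrmin 3 i (by omega) (by omega) hi hc
    have : r = 3 := by
      rcases hrch with h5 | ⟨j, hj, hcj⟩
      · omega
      · rcases key r hr0 (by omega) with h | h | h | h | h
        · rw [h] at hcj; exact absurd (m0.mpr ⟨j, hj, hcj⟩) h0
        · rw [h] at hcj; exact absurd (m1.mpr ⟨j, hj, hcj⟩) h1
        · rw [h] at hcj; exact absurd (m2.mpr ⟨j, hj, hcj⟩) h2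
        · omega
        · omega
    rw [this]; decide
  · obtain ⟨i, hi, hc⟩ := m4.mp h4
    have hle : r ≤ 4 := hrmin 4 i (by omega) (by omega) hi hc
    have : r = 4 := by
      rcases hrch with h5 | ⟨j, hj, hcj⟩
      · omega
      · rcases key r hr0 (by omega) with h | h | h | h | h
        · rw [h] at hcj; exact absurd (m0.mpr ⟨j, hj, hcj⟩) h0
        · rw [h] at hcj; exact absurd (m1.mpr ⟨j, hj, hcj⟩) h1
        · rw [h] at hcj; exact absurd (m2.mpr ⟨j, hj, hcj⟩) h2
        · rw [h] at hcj; exact absurd (m3.mpr ⟨j, hj, hcj⟩) h3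
        · omega
    rw [this]; decide
  · have : r = 5 := by
      rcases hrch with h5 | ⟨j, hj, hcj⟩
      · exact h5
      · exfalso
        have hrlt : r < 5 := by
          rcases lt_or_eq_of_le hr5 with hlt | heq
          · exact hlt
          · rw [heq] at hcj; simp [pvC, GROUPS] at hcj
        rcases key r hr0 hrlt with h | h | h | h | h <;> rw [h] at hcj
        · exact h0 (m0.mpr ⟨j, hj, hcj⟩)
        · exact h1 (m1.mpr ⟨j, hj, hcj⟩)
        · exact h2 (m2.mpr ⟨j, hj, hcj⟩)
        · exact h3 (m3.mpr ⟨j, hj, hcj⟩)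
        · exact h4 (m4.mpr ⟨j, hj, hcj⟩)
    rw [this]; decide
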